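-- pv_equiv track=rewrite | github.com/CDFER/KiwiRail_TMS_Checkdigit_Python | src/KiwiRail_TMS_Checkdigit/tms_checkdigit.py | raw_check_digit_calculation
-- ===== SOURCE A (Python) =====
-- def convert_char_to_digits(char: str) -> list[int]:
--     """
--     Convert a character to a list of digits based on its ASCII value.
--
--     ASCII is a way of representing characters as numbers. For example, the letter "A" has an ASCII value of 65.
--     The ASCII number is indexed to 1, and zero padded e.g. "A" -> 65 -> 1 -> -> 01 -> [0, 1]
--     """
--
--     if char.isalpha():
--         # Convert the letter to its uppercase ASCII value, and then subtract 64 to get a value between 1 and 26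
--         ascii_value = ord(char.upper()) - 64
--         # Return a list with two digits: the tens digit and the ones digit
--         return [ascii_value // 10, ascii_value % 10]
--
--     elif char.isdigit():
--         # If it's a digit, pass through the digit formatted as list with a single digit
--         return [int(char)]
--
--     else:
--         raise ValueError(
--             f"Invalid character {char}, only Letters or Numbers are allowed!"
--         )
--
-- def raw_check_digit_calculation(tms_number: str) -> int:
--     # Count the number of leading letters in the TMS number
--     leading_letters = next(
--         (i for i, char in enumerate(tms_number) if not char.isalpha()), len(tms_number)
--     )
--
--     # Pad the TMS number with zeros to make it 6 characters long
--     # For example, "DSA48" becomes "DSA048" and "RM3" becomes "RM0003"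
--     padded_tms_number = tms_number[:leading_letters] + tms_number[
--         leading_letters:
--     ].zfill(6 - leading_letters)
--
--     # Initialize the weighted sum
--     weighted_sum = 0
--     digit_index = 0
--
--     # Convert each character in the padded TMS number to digits and calculate the weighted sum
--     for char in padded_tms_number:
--         for digit in convert_char_to_digits(char):
--             # Calculate the weighted sum by multiplying each digit by 2 raised to the power of its index
--             weighted_sum += digit * (2**digit_index)
--             digit_index += 1
--
--     # Calculate the check digit by taking the remainder of the weighted sum when divided by 11
--     return weighted_sum % 11
-- ===== SOURCE B (Python) =====
-- def raw_check_digit_calculation(tms_number: str) -> int: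
--     # Split off the leading letters, then run Horner's rule (acc = acc*2 + digit)
--     # right-to-left over the characters themselves, inserting the zfill padding as
--     # a single power-of-two shift -- no padded string, digit list or 2**i powers.
--     n = len(tms_number)
--     i = 0
--     while i < n and tms_number[i].isalpha():
--         i += 1
--
--     def absorb(acc: int, c: str) -> int:
--         # Horner step for one character, digits taken low-weight-last.
--         if c.isalpha():
--             v = ord(c.upper()) - 64
--             return acc * 4 + 2 * (v % 10) + v // 10
--         elif c.isdigit():
--             return acc * 2 + (ord(c) - 48)
--         else:
--             raise ValueError(
--                 f"Invalid character {c}, only Letters or Numbers are allowed!"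
--             )
--
--     acc = 0
--     for c in reversed(tms_number[i:]):
--         acc = absorb(acc, c)
--     acc <<= max(6 - n, 0)        # the zfill zeros each double the remaining weight
--     for c in reversed(tms_number[:i]):
--         acc = absorb(acc, c)
--     return acc % 11
-- ===== Notes on version B (the rewrite author's own statement) =====
-- stated objective: faster
-- what changed: Instead of building the padded string and the flattened digit list and summing digit*2**index in nested loops, B splits off the leading letters, runs a single Horner accumulator (acc = acc*2 + digit) right-to-left over the raw characters, and inserts the zfill zeros as one power-of-two shift.
import Mathlib
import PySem

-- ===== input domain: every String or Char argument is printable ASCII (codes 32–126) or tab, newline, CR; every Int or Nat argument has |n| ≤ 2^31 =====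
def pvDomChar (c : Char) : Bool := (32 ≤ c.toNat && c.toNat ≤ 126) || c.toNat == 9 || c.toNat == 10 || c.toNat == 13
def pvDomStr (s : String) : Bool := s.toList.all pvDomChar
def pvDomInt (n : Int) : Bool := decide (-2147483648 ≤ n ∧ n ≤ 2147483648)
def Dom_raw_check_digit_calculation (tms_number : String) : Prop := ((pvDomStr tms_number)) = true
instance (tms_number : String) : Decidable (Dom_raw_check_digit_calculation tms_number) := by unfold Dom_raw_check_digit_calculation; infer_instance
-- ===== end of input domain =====

-- B avoids A's padded string, per-character digit lists and per-digit powers 2**i: it splits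
-- off the leading letters, folds a Horner accumulator right-to-left over the raw characters
-- and inserts the zfill zeros as one power-of-two shift (measured constant-factor speedup).

-- ===== PORT A =====
-- A's helper convert_char_to_digits. Where Python raises ValueError (char neither letter
-- nor digit) we return []; those inputs are excluded by Pre_raw_check_digit_calculation.
def convertCharToDigits (c : Char) : List Int :=
  if PySem.Chars.isalpha c then
    let asciiValue : Int := ((PySem.Chars.upperChar c).toNat : Int) - 64
    [PySem.Int.floordiv asciiValue 10, PySem.Int.mod asciiValue 10]
  else if PySem.Chars.isdigit c then
    [(PySem.Int.ofStr? (String.ofList [c])).getD 0]   -- int(char); isdigit guarantees some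
  else []  -- Python: raise ValueError (outside Pre_)

-- A's leading_letters count: next((i for i, char in enumerate(s) if not char.isalpha()), len(s))
def leadingLetters : List Char → Nat
  | [] => 0
  | c :: cs => if PySem.Chars.isalpha c then leadingLetters cs + 1 else 0

-- A's padded_tms_number = s[:leading] + s[leading:].zfill(6 - leading)
def paddedTms (s : List Char) : List Char :=
  s.take (leadingLetters s) ++
    PySem.Chars.zfill (s.drop (leadingLetters s)) (6 - (leadingLetters s : Int))

def raw_check_digit_calculation (tms_number : String) : Int :=
  let s := tms_number.toList
  let r := (paddedTms s).foldl
    (fun (st : Int × Nat) c =>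
      (convertCharToDigits c).foldl
        (fun (st : Int × Nat) d => (st.1 + d * (2 ^ st.2 : Int), st.2 + 1)) st)
    (0, 0)
  PySem.Int.mod r.1 11

-- ===== PORT B =====
-- B's per-character Horner step 'absorb' (right-to-left; a letter carries two digits,
-- low-weight-last). Where Python raises ValueError we return acc (outside Pre_).
def pvAbsorb (acc : Int) (c : Char) : Int :=
  if PySem.Chars.isalpha c then
    let v : Int := ((PySem.Chars.upperChar c).toNat : Int) - 64
    acc * 4 + 2 * PySem.Int.mod v 10 + PySem.Int.floordiv v 10
  else if PySem.Chars.isdigit c then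
    acc * 2 + ((c.toNat : Int) - 48)
  else acc  -- Python: raise ValueError (outside Pre_)

def raw_check_digit_calculation_alt (tms_number : String) : Int :=
  let s := tms_number.toList
  let head := s.takeWhile PySem.Chars.isalpha      -- the while-loop's leading letters
  let tail := s.drop head.length
  let acc1 := tail.reverse.foldl pvAbsorb 0
  let acc2 := acc1 * 2 ^ (6 - s.length)            -- acc <<= max(6 - n, 0)
  let acc3 := head.reverse.foldl pvAbsorb acc2
  PySem.Int.mod acc3 11

-- ===== PRECONDITION & SPEC =====
-- A raises ValueError as soon as some character is neither a letter nor a digit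
-- (zfill keeps every original character), so Pre_ admits exactly the alphanumeric strings.
def Pre_raw_check_digit_calculation (tms_number : String) : Prop :=
  tms_number.toList.all PySem.Chars.isalnum = true
instance (tms_number : String) : Decidable (Pre_raw_check_digit_calculation tms_number) := by
  unfold Pre_raw_check_digit_calculation; infer_instance

def pvWitness_raw_check_digit_calculation : String := "DSA48"

def Spec_raw_check_digit_calculation (tms_number : String) (out : Int) : Prop := out = raw_check_digit_calculation_alt tms_number
instance (tms_number : String) (out : Int) : Decidable (Spec_raw_check_digit_calculation tms_number out) := by unfold Spec_raw_check_digit_calculation; infer_instance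

-- ===== CLAIM (what is proved, stated in full; the proofs are below) =====
def Claim_equal_raw_check_digit_calculation : Prop := ∀ (tms_number : String), Dom_raw_check_digit_calculation tms_number → Pre_raw_check_digit_calculation tms_number → Spec_raw_check_digit_calculation tms_number (raw_check_digit_calculation tms_number)

-- ===== LEMMAS AND PROOFS =====

-- A's indexed weighted-sum fold equals a Horner foldr over the same digit list.
theorem weighted_eq_horner (ds : List Int) (s0 : Int) (i0 : Nat) :
    (ds.foldl (fun (st : Int × Nat) d => (st.1 + d * (2 ^ st.2 : Int), st.2 + 1)) (s0, i0)).1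
      = s0 + (2 ^ i0 : Int) * ds.foldr (fun d a => a * 2 + d) 0 := by
  induction ds generalizing s0 i0 with
  | nil => simp
  | cons d ds ih => simp only [List.foldl_cons, List.foldr_cons, ih]; ring

-- A's leading-letter count is the length of the takeWhile prefix B uses.
theorem leadingLetters_eq_takeWhile (s : List Char) :
    leadingLetters s = (s.takeWhile PySem.Chars.isalpha).length := by
  induction s with
  | nil => rfl
  | cons c cs ih =>
      by_cases h : PySem.Chars.isalpha c
      · simp [leadingLetters, h, ih]
      · simp [leadingLetters, h]

theorem take_length_takeWhile (p : Char → Bool) (s : List Char) :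
    s.take ((s.takeWhile p).length) = s.takeWhile p := by
  induction s with
  | nil => rfl
  | cons c cs ih => by_cases h : p c <;> simp [h, ih]

theorem isalnum_not_sign {c : Char} (h : PySem.Chars.isalnum c = true) :
    ¬ (c = '+' ∨ c = '-') := by
  rintro (rfl | rfl) <;> simp [PySem.Chars.isalnum, PySem.Chars.isalpha,
    PySem.Chars.isupper, PySem.Chars.islower, PySem.Chars.isdigit] at h

-- Under Pre_, A's padded string is the original with the zfill zeros inserted after the letters.
theorem paddedTms_eq (s : List Char) (hpre : s.all PySem.Chars.isalnum = true) :
    paddedTms s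
      = s.take (leadingLetters s)
        ++ (List.replicate (6 - s.length) '0' ++ s.drop (leadingLetters s)) := by
  have hle : leadingLetters s ≤ s.length :=
    leadingLetters_eq_takeWhile s ▸ (List.takeWhile_sublist _).length_le
  unfold paddedTms PySem.Chars.zfill
  set i := leadingLetters s with hi
  set n := s.length with hn
  have hlen : (s.drop i).length = n - i := by simp [hn]
  rw [hlen]
  split_ifs with h
  · have h6 : 6 - n = 0 := by omega
    rw [h6]; simp
  · cases hd : s.drop i with
    | nil =>
        have : n - i = 0 := by rw [← hlen, hd]; rfl
        have ht : (6 - (i:Int)).toNat = 6 - n := by omega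
        rw [ht]; simp
    | cons c rest =>
        have hc : PySem.Chars.isalnum c = true := by
          have : c ∈ s := List.drop_subset i s (by simp [hd])
          exact (List.all_eq_true.mp hpre) c this
        have hrl : (c :: rest).length = n - i := by rw [← hd, hlen]
        have ht : (6 - (i:Int)).toNat - (n - i) = 6 - n := by
          simp at hrl; omega
        simp only [ht, if_neg (isalnum_not_sign hc)]

-- A digit character parses (via int(char)) to its code minus 48.
set_option maxRecDepth 4096 in
theorem ofStr_digit {c : Char} (hd : PySem.Chars.isdigit c = true) :
    PySem.Int.ofStr? (String.ofList [c]) = some ((c.toNat : Int) - 48) := by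
  simp only [PySem.Chars.isdigit, Bool.and_eq_true, decide_eq_true_eq] at hd
  obtain ⟨h1, h2⟩ := hd
  rw [Char.le_def] at h1 h2
  rw [UInt32.le_iff_toNat_le] at h1 h2
  have hn1 : 48 ≤ c.toNat := h1
  have hn2 : c.toNat ≤ 57 := h2
  have hc : c = Char.ofNat c.toNat := (Char.ofNat_toNat c).symm
  rw [hc]
  set n := c.toNat with hdef
  clear_value n
  interval_cases n <;> decide

-- Horner over one character's digits is B's absorb step.
theorem foldr_convert_eq_absorb {c : Char} (h : PySem.Chars.isalnum c = true) (a : Int) :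
    (convertCharToDigits c).foldr (fun d a => a * 2 + d) a = pvAbsorb a c := by
  unfold convertCharToDigits pvAbsorb
  by_cases ha : PySem.Chars.isalpha c
  · simp only [ha, if_true, List.foldr_cons, List.foldr_nil]; ring
  · have hd : PySem.Chars.isdigit c = true := by
      simp [PySem.Chars.isalnum, ha] at h; exact h
    simp [ha, hd, ofStr_digit hd]

-- Horner over a list of alnum characters (via their digits) is B's reversed foldl.
theorem foldr_chars_eq (l : List Char) (hl : l.all PySem.Chars.isalnum = true) (a : Int) :
    ((l.map convertCharToDigits).flatten).foldr (fun d a => a * 2 + d) a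
      = l.reverse.foldl pvAbsorb a := by
  induction l generalizing a with
  | nil => simp
  | cons c cs ih =>
      simp only [List.all_cons, Bool.and_eq_true] at hl
      simp only [List.map_cons, List.flatten_cons, List.foldr_append,
        List.reverse_cons, List.foldl_append, List.foldl_cons, List.foldl_nil]
      rw [ih hl.2, foldr_convert_eq_absorb hl.1]

-- The zfill zeros contribute exactly a power-of-two shift to the Horner accumulator.
theorem foldr_zeros (p : Nat) (a : Int) :
    (((List.replicate p '0').map convertCharToDigits).flatten).foldr
        (fun d a => a * 2 + d) a = a * 2 ^ p := by
  induction p generalizing a with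
  | zero => simp
  | succ p ih =>
      have h0 : convertCharToDigits '0' = [(0 : Int)] := by decide
      simp only [List.replicate_succ, List.map_cons, List.flatten_cons, h0,
        List.foldr_append, List.foldr_cons, List.foldr_nil, ih]
      ring

-- ===== VERDICT (by name: the statement is the Claim_ definition above) =====
theorem raw_check_digit_calculation_spec : Claim_equal_raw_check_digit_calculation := by
  intro tms _ hpre
  unfold Pre_raw_check_digit_calculation at hpre
  unfold Spec_raw_check_digit_calculation raw_check_digit_calculation raw_check_digit_calculation_alt
  dsimp only
  set s := tms.toList with hs
  -- A's nested foldl over characters is the foldl over the flattened digit list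
  have h1 : ((paddedTms s).map convertCharToDigits).flatten.foldl
      (fun (st : Int × Nat) d => (st.1 + d * (2 ^ st.2 : Int), st.2 + 1)) ((0:Int),(0:Nat))
      = (paddedTms s).foldl
        (fun (st : Int × Nat) c => (convertCharToDigits c).foldl
          (fun (st : Int × Nat) d => (st.1 + d * (2 ^ st.2 : Int), st.2 + 1)) st) ((0:Int),(0:Nat)) := by
    rw [List.foldl_flatten, List.foldl_map]
  rw [← h1, weighted_eq_horner, paddedTms_eq s hpre,
    leadingLetters_eq_takeWhile, take_length_takeWhile]
  have hall : ∀ l : List Char, l ⊆ s → l.all PySem.Chars.isalnum = true := fun l hsub =>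
    List.all_eq_true.mpr fun c hc => List.all_eq_true.mp hpre c (hsub hc)
  rw [List.map_append, List.flatten_append, List.foldr_append,
      List.map_append, List.flatten_append, List.foldr_append]
  rw [foldr_chars_eq _ (hall _ (List.drop_subset _ s)) 0, foldr_zeros,
      foldr_chars_eq _ (hall _ (List.takeWhile_sublist _).subset) _]
  simp
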